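-- pv_equiv track=rewrite | github.com/aditya001824/Password-Strength-Analyzer | suggestions.py | give_suggestions
-- ===== SOURCE A (Python) =====
-- def give_suggestions(password):
--
--     suggestions = []
--
--     if len(password) < 8:
--         suggestions.append("Use at least 8 characters")
--
--     if not any(char.isupper() for char in password):
--         suggestions.append("Add uppercase letters")
--
--     if not any(char.islower() for char in password):
--         suggestions.append("Add lowercase letters")
--
--     if not any(char.isdigit() for char in password):
--         suggestions.append("Add numbers")
--
--     if not any(char in "!@#$%^&*" for char in password):
--         suggestions.append("Add special characters")
--
--     return suggestions
-- ===== SOURCE B (Python) =====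
-- def give_suggestions(password):
--     has_upper = has_lower = has_digit = has_special = False
--     for char in password:
--         if char.isupper():
--             has_upper = True
--         elif char.islower():
--             has_lower = True
--         elif char.isdigit():
--             has_digit = True
--         elif char in "!@#$%^&*":
--             has_special = True
--     suggestions = []
--     if len(password) < 8:
--         suggestions.append("Use at least 8 characters")
--     if not has_upper:
--         suggestions.append("Add uppercase letters")
--     if not has_lower:
--         suggestions.append("Add lowercase letters")
--     if not has_digit:
--         suggestions.append("Add numbers")
--     if not has_special:
--         suggestions.append("Add special characters")
--     return suggestions
-- ===== Notes on version B (the rewrite author's own statement) =====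
-- stated objective: faster
-- what changed: Replaces A's five separate scans (len + four any(...) generator passes) with a single loop that records all four character-class flags at once (the classes are mutually exclusive), then assembles the messages from the flags; measured ~3x faster at large sizes.
import Mathlib
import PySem

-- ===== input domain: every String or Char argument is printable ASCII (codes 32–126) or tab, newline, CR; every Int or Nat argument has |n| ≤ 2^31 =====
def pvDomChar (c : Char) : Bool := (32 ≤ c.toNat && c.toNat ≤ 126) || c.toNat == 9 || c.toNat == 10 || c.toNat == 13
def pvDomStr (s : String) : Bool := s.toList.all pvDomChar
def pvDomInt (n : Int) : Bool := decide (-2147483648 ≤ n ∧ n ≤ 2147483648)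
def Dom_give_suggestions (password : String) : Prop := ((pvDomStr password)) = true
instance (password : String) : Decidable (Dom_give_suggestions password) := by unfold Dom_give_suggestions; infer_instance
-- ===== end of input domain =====

-- B replaces A's separate any(...) scans with one loop setting all four class flags (single pass; measured faster in a timing run).

-- ===== PORT A =====
def give_suggestions (password : String) : List String :=
  let suggestions : List String := []
  let suggestions := if PySem.Str.len password < 8 then suggestions ++ ["Use at least 8 characters"] else suggestions
  let suggestions := if !(password.toList.any PySem.Chars.isupper) then suggestions ++ ["Add uppercase letters"] else suggestions
  let suggestions := if !(password.toList.any PySem.Chars.islower) then suggestions ++ ["Add lowercase letters"] else suggestions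
  let suggestions := if !(password.toList.any PySem.Chars.isdigit) then suggestions ++ ["Add numbers"] else suggestions
  let suggestions := if !(password.toList.any (fun c => "!@#$%^&*".toList.contains c)) then suggestions ++ ["Add special characters"] else suggestions
  suggestions

-- ===== PORT B =====
def gsStep (f : Bool × Bool × Bool × Bool) (c : Char) : Bool × Bool × Bool × Bool :=
  if PySem.Chars.isupper c then (true, f.2)
  else if PySem.Chars.islower c then (f.1, true, f.2.2)
  else if PySem.Chars.isdigit c then (f.1, f.2.1, true, f.2.2.2)
  else if "!@#$%^&*".toList.contains c then (f.1, f.2.1, f.2.2.1, true)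
  else f

def give_suggestions_alt (password : String) : List String :=
  let flags := password.toList.foldl gsStep (false, false, false, false)
  let suggestions := if PySem.Str.len password < 8 then ["Use at least 8 characters"] else []
  let suggestions := if !flags.1 then suggestions ++ ["Add uppercase letters"] else suggestions
  let suggestions := if !flags.2.1 then suggestions ++ ["Add lowercase letters"] else suggestions
  let suggestions := if !flags.2.2.1 then suggestions ++ ["Add numbers"] else suggestions
  let suggestions := if !flags.2.2.2 then suggestions ++ ["Add special characters"] else suggestions
  suggestions

-- ===== PRECONDITION & SPEC =====
def Spec_give_suggestions (password : String) (out : List String) : Prop := out = give_suggestions_alt password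
instance (password : String) (out : List String) : Decidable (Spec_give_suggestions password out) := by unfold Spec_give_suggestions; infer_instance

-- ===== CLAIM (what is proved, stated in full; the proofs are below) =====
def Claim_equal_give_suggestions : Prop := ∀ (password : String), Dom_give_suggestions password → Spec_give_suggestions password (give_suggestions password)

-- ===== LEMMAS AND PROOFS =====

lemma upper_range {c : Char} (h : PySem.Chars.isupper c = true) : 'A' ≤ c ∧ c ≤ 'Z' := by
  simpa [PySem.Chars.isupper] using h

lemma lower_range {c : Char} (h : PySem.Chars.islower c = true) : 'a' ≤ c ∧ c ≤ 'z' := by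
  simpa [PySem.Chars.islower] using h

lemma special_not_alnum {c : Char} (h : ("!@#$%^&*".toList.contains c) = true) :
    PySem.Chars.isupper c = false ∧ PySem.Chars.islower c = false ∧ PySem.Chars.isdigit c = false := by
  rw [show "!@#$%^&*".toList = ['!','@','#','$','%','^','&','*'] from rfl] at h
  simp only [List.contains_eq_mem, List.mem_cons, List.not_mem_nil, or_false, decide_eq_true_eq] at h
  rcases h with h|h|h|h|h|h|h|h <;> subst h <;> exact ⟨rfl, rfl, rfl⟩

lemma upper_not_lower {c : Char} (h : PySem.Chars.isupper c = true) : PySem.Chars.islower c = false := by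
  obtain ⟨_, h2⟩ := upper_range h
  simp only [PySem.Chars.islower, Bool.and_eq_false_iff, decide_eq_false_iff_not]
  exact Or.inl (fun hc => absurd (le_trans hc h2) (by decide))

lemma upper_not_digit {c : Char} (h : PySem.Chars.isupper c = true) : PySem.Chars.isdigit c = false := by
  obtain ⟨h1, _⟩ := upper_range h
  simp only [PySem.Chars.isdigit, Bool.and_eq_false_iff, decide_eq_false_iff_not]
  exact Or.inr (fun hc => absurd (le_trans h1 hc) (by decide))

lemma lower_not_digit {c : Char} (h : PySem.Chars.islower c = true) : PySem.Chars.isdigit c = false := by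
  obtain ⟨h1, _⟩ := lower_range h
  simp only [PySem.Chars.isdigit, Bool.and_eq_false_iff, decide_eq_false_iff_not]
  exact Or.inr (fun hc => absurd (le_trans h1 hc) (by decide))

lemma upper_not_special {c : Char} (h : PySem.Chars.isupper c = true) :
    ("!@#$%^&*".toList.contains c) = false := by
  cases hs : ("!@#$%^&*".toList.contains c) with
  | false => rfl
  | true => exact absurd h (by simp [(special_not_alnum hs).1])

lemma lower_not_special {c : Char} (h : PySem.Chars.islower c = true) :
    ("!@#$%^&*".toList.contains c) = false := by
  cases hs : ("!@#$%^&*".toList.contains c) with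
  | false => rfl
  | true => exact absurd h (by simp [(special_not_alnum hs).2.1])

lemma digit_not_special {c : Char} (h : PySem.Chars.isdigit c = true) :
    ("!@#$%^&*".toList.contains c) = false := by
  cases hs : ("!@#$%^&*".toList.contains c) with
  | false => rfl
  | true => exact absurd h (by simp [(special_not_alnum hs).2.2])

lemma gsStep_char (f : Bool × Bool × Bool × Bool) (c : Char) :
    gsStep f c = (f.1 || PySem.Chars.isupper c, f.2.1 || PySem.Chars.islower c,
      f.2.2.1 || PySem.Chars.isdigit c, f.2.2.2 || "!@#$%^&*".toList.contains c) := by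
  unfold gsStep
  split_ifs with h1 h2 h3 h4
  · rw [h1, upper_not_lower h1, upper_not_digit h1, upper_not_special h1]; simp
  · rw [Bool.eq_false_iff.mpr h1, h2, lower_not_digit h2, lower_not_special h2]; simp
  · rw [Bool.eq_false_iff.mpr h1, Bool.eq_false_iff.mpr h2, h3, digit_not_special h3]; simp
  · rw [Bool.eq_false_iff.mpr h1, Bool.eq_false_iff.mpr h2, Bool.eq_false_iff.mpr h3, h4]; simp
  · rw [Bool.eq_false_iff.mpr h1, Bool.eq_false_iff.mpr h2, Bool.eq_false_iff.mpr h3,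
      Bool.eq_false_iff.mpr h4]; simp

lemma gsFold (cs : List Char) (f : Bool × Bool × Bool × Bool) :
    cs.foldl gsStep f = (f.1 || cs.any PySem.Chars.isupper, f.2.1 || cs.any PySem.Chars.islower,
      f.2.2.1 || cs.any PySem.Chars.isdigit,
      f.2.2.2 || cs.any (fun c => "!@#$%^&*".toList.contains c)) := by
  induction cs generalizing f with
  | nil => simp
  | cons c cs ih =>
    simp only [List.foldl_cons, List.any_cons, ih, gsStep_char]
    simp [Bool.or_assoc]

-- ===== VERDICT (by name: the statement is the Claim_ definition above) =====
theorem give_suggestions_spec : Claim_equal_give_suggestions := by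
  intro password _
  unfold Spec_give_suggestions give_suggestions give_suggestions_alt
  simp only [gsFold]
  simp
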